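-- pv_equiv track=rewrite | github.com/Pibborn/HumanActionRecognition | SIFT3D/python/videodescription/vocab_creation.py | init_ngram_dict
-- ===== SOURCE A (Python) =====
-- import itertools
--
-- def init_ngram_dict(n_clusters, ngram_length):
--     ngram_list =  list(itertools.product(range(n_clusters), repeat=ngram_length))
--     ngram_dict = dict()
--     for i in range(0, len(ngram_list)):
--         ngram_key_string = ''
--         for j in range(0, ngram_length):
--             ngram_key_string += str(ngram_list[i][j]) + '-'
--         ngram_dict[ngram_key_string] = 0
--     return ngram_dict
-- ===== SOURCE B (Python) =====
-- def init_ngram_dict(n_clusters, ngram_length):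
--     # Grow the key set one position at a time instead of materializing
--     # itertools.product tuples and re-deriving each key with an inner loop.
--     if ngram_length < 0:
--         raise ValueError('ngram_length must be non-negative')
--     frontier = ['']
--     for _ in range(ngram_length):
--         frontier = [p + str(d) + '-' for p in frontier for d in range(n_clusters)]
--     return {k: 0 for k in frontier}
-- ===== Notes on version B (the rewrite author's own statement) =====
-- stated objective: alternative
-- what changed: B builds the key strings level by level (frontier of partial keys extended by one digit per round) instead of materializing all itertools.product tuples and re-deriving each key with an inner index loop.
import Mathlib
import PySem

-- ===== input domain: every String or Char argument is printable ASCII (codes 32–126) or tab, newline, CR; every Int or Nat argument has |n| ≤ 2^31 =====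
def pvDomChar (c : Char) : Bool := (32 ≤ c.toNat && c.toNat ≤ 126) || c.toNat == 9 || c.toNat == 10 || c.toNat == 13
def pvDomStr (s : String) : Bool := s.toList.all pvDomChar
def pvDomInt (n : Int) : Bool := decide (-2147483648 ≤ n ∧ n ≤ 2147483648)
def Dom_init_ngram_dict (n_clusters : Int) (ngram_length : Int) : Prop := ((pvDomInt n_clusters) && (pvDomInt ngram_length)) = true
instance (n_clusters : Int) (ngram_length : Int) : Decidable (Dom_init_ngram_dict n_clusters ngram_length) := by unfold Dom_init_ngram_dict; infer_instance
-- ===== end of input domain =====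

-- B builds the n-gram keys level by level (frontier of partial keys) instead of
-- materializing product tuples and re-deriving each key with an inner loop; alternative decomposition, same cost.


-- ===== PORT A =====
-- itertools.product(range(n), repeat=r): first coordinate varies slowest
def pvProdRep (n : Int) : Nat → List (List Int)
  | 0 => [[]]
  | r+1 => (PySem.List.pyRange 0 n 1).flatMap (fun a => (pvProdRep n r).map (fun t => a :: t))

def init_ngram_dict (n_clusters : Int) (ngram_length : Int) : List (String × Int) :=
  let ngram_list := pvProdRep n_clusters ngram_length.toNat
  let ngram_dict :=
    (PySem.List.pyRange 0 (PySem.List.len ngram_list) 1).foldl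
      (fun d i =>
        let key := (PySem.List.pyRange 0 ngram_length 1).foldl
          (fun s j => s ++ PySem.Int.toStr (PySem.List.pyGetD (PySem.List.pyGetD ngram_list i []) j 0) ++ "-") ""
        d.insert key 0)
      (PySem.Dict.empty : PySem.Dict String Int)
  ngram_dict.items

-- ===== PORT B =====
-- Source B's explicit ValueError for ngram_length < 0 lies outside Pre_; the loop below is its code on 0 ≤ ngram_length
def init_ngram_dict_alt (n_clusters : Int) (ngram_length : Int) : List (String × Int) :=
  let frontier :=
    (PySem.List.pyRange 0 ngram_length 1).foldl
      (fun fr _ => fr.flatMap (fun p =>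
        (PySem.List.pyRange 0 n_clusters 1).map (fun d => p ++ PySem.Int.toStr d ++ "-")))
      [""]
  (frontier.foldl (fun d k => d.insert k (0 : Int)) (PySem.Dict.empty : PySem.Dict String Int)).items

-- ===== PRECONDITION & SPEC =====
-- A raises ValueError when ngram_length < 0 (itertools.product rejects a negative repeat); B raises there too
def Pre_init_ngram_dict (n_clusters : Int) (ngram_length : Int) : Prop := 0 ≤ ngram_length
instance (n_clusters : Int) (ngram_length : Int) : Decidable (Pre_init_ngram_dict n_clusters ngram_length) := by unfold Pre_init_ngram_dict; infer_instance
def pvWitness_init_ngram_dict : Int × Int := (3, 2)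

def Spec_init_ngram_dict (n_clusters : Int) (ngram_length : Int) (out : List (String × Int)) : Prop := out = init_ngram_dict_alt n_clusters ngram_length
instance (n_clusters : Int) (ngram_length : Int) (out : List (String × Int)) : Decidable (Spec_init_ngram_dict n_clusters ngram_length out) := by unfold Spec_init_ngram_dict; infer_instance

-- ===== CLAIM (what is proved, stated in full; the proofs are below) =====
def Claim_equal_init_ngram_dict : Prop := ∀ (n_clusters : Int) (ngram_length : Int), Dom_init_ngram_dict n_clusters ngram_length → Pre_init_ngram_dict n_clusters ngram_length → Spec_init_ngram_dict n_clusters ngram_length (init_ngram_dict n_clusters ngram_length)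

-- ===== LEMMAS AND PROOFS =====

-- the key built from a tuple t
def pvEnc (t : List Int) : String := t.foldl (fun s x => s ++ PySem.Int.toStr x ++ "-") ""

-- one level of B's frontier growth
def pvGrow (n : Int) (fr : List String) : List String :=
  fr.flatMap (fun p => (PySem.List.pyRange 0 n 1).map (fun d => p ++ PySem.Int.toStr d ++ "-"))

lemma pvProdRep_length (n : Int) : ∀ (r : Nat), ∀ t ∈ pvProdRep n r, t.length = r := by
  intro r
  induction r with
  | zero => intro t ht; simp [pvProdRep] at ht; simp [ht]
  | succ r ih =>
    intro t ht
    simp only [pvProdRep, List.mem_flatMap, List.mem_map] at ht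
    obtain ⟨a, _, t', ht', rfl⟩ := ht
    simp [ih t' ht']

lemma pvProdRep_snoc (n : Int) : ∀ (r : Nat),
    pvProdRep n (r+1) = (pvProdRep n r).flatMap (fun t => (PySem.List.pyRange 0 n 1).map (fun a => t ++ [a])) := by
  intro r
  induction r with
  | zero =>
    simp only [pvProdRep]
    induction (PySem.List.pyRange 0 n 1) with
    | nil => simp
    | cons a l ihl => simp_all
  | succ r ih =>
    conv_lhs => rw [pvProdRep, ih]
    rw [pvProdRep]
    simp [List.map_flatMap, List.flatMap_map, List.map_map, List.flatMap_assoc, Function.comp_def]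

lemma pvEnc_snoc (t : List Int) (a : Int) : pvEnc (t ++ [a]) = pvEnc t ++ PySem.Int.toStr a ++ "-" := by
  simp [pvEnc, List.foldl_append]

lemma pvGrow_iterate (n : Int) : ∀ (r : Nat), (pvGrow n)^[r] [""] = (pvProdRep n r).map pvEnc := by
  intro r
  induction r with
  | zero => simp [pvProdRep, pvEnc]
  | succ r ih =>
    rw [Function.iterate_succ_apply', ih, pvProdRep_snoc]
    simp [pvGrow, List.map_flatMap, List.flatMap_map, List.map_map, Function.comp_def, pvEnc_snoc]

lemma pvFoldl_const {α β : Type} (F : α → α) : ∀ (l : List β) (init : α),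
    l.foldl (fun a _ => F a) init = F^[l.length] init := by
  intro l
  induction l with
  | nil => intro init; simp
  | cons x t ih => intro init; simp [ih, Function.iterate_succ_apply]

lemma pvAlt_eq (n r : Int) (hr : 0 ≤ r) :
    init_ngram_dict_alt n r =
      (((pvProdRep n r.toNat).map pvEnc).foldl (fun d k => d.insert k (0 : Int)) PySem.Dict.empty).items := by
  show (((PySem.List.pyRange 0 r 1).foldl (fun fr (_ : Int) => pvGrow n fr) [""]).foldl
      (fun d k => d.insert k (0 : Int)) (PySem.Dict.empty : PySem.Dict String Int)).items = _
  rw [pvFoldl_const (pvGrow n) (PySem.List.pyRange 0 r 1) [""], PySem.List.length_pyRange_one]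
  have : ((r - 0).toNat) = r.toNat := by omega
  rw [this, pvGrow_iterate]

lemma pvA_eq (n r : Int) (hr : 0 ≤ r) :
    init_ngram_dict n r =
      (((pvProdRep n r.toNat).map pvEnc).foldl (fun d k => d.insert k (0 : Int)) PySem.Dict.empty).items := by
  show ((PySem.List.pyRange 0 (PySem.List.len (pvProdRep n r.toNat)) 1).foldl
      (fun d i => d.insert ((PySem.List.pyRange 0 r 1).foldl
        (fun s j => s ++ PySem.Int.toStr (PySem.List.pyGetD (PySem.List.pyGetD (pvProdRep n r.toNat) i []) j 0) ++ "-") "") 0)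
      (PySem.Dict.empty : PySem.Dict String Int)).items = _
  rw [PySem.List.foldl_pyRange_zero_pyGetD (pvProdRep n r.toNat) ([] : List Int)
      (fun (d : PySem.Dict String Int) t =>
        d.insert ((PySem.List.pyRange 0 r 1).foldl
          (fun s j => s ++ PySem.Int.toStr (PySem.List.pyGetD t j 0) ++ "-") "") 0)
      PySem.Dict.empty]
  rw [List.foldl_map]
  apply congrArg
  apply PySem.List.foldl_congr_mem
  intro d t ht
  have hlen : PySem.List.len t = r := by
    have := pvProdRep_length n r.toNat t ht
    simp [PySem.List.len, this, Int.toNat_of_nonneg hr]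
  rw [← hlen,
    PySem.List.foldl_pyRange_zero_pyGetD t (0 : Int)
      (fun (s : String) x => s ++ PySem.Int.toStr x ++ "-") ""]
  rfl

-- ===== VERDICT (by name: the statement is the Claim_ definition above) =====
theorem init_ngram_dict_spec : Claim_equal_init_ngram_dict := by
  intro n r _ hpre
  unfold Spec_init_ngram_dict
  rw [pvA_eq n r hpre, pvAlt_eq n r hpre]
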